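-- pv_equiv track=rewrite | github.com/akim42003/AVRA | backend/sliding_svm.py | calculate_label_stability
-- ===== SOURCE A (Python) =====
-- def calculate_label_stability(predictions, step_size):
--     stability_scores = {}
--     current_label = int(predictions[0][1])  # Convert the initial label to an int
--     current_streak = step_size
--
--     for i in range(1, len(predictions)):
--         label = int(predictions[i][1])  # Convert each label to an int
--
--         if label == current_label:
--             current_streak += step_size
--         else:
--             if current_label not in stability_scores:
--                 stability_scores[current_label] = 0
--             stability_scores[current_label] += current_streak
--
--             # Reset for new label
--             current_label = label
--             current_streak = step_size
--
--     # Final update for the last streak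
--     if current_label not in stability_scores:
--         stability_scores[current_label] = 0
--     stability_scores[current_label] += current_streak
--
--     return stability_scores
-- ===== SOURCE B (Python) =====
-- def calculate_label_stability(predictions, step_size):
--     counts = {}
--     for p in predictions:
--         label = int(p[1])
--         counts[label] = counts.get(label, 0) + 1
--     return {label: count * step_size for label, count in counts.items()}
-- ===== Notes on version B (the rewrite author's own statement) =====
-- stated objective: simpler
-- what changed: B drops A's streak/current-label/current-streak state machine entirely: it counts occurrences of each label in one plain pass (first-appearance key order) and then maps each count to count * step_size, which equals the sum of A's per-streak accumulations.
import Mathlib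
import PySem

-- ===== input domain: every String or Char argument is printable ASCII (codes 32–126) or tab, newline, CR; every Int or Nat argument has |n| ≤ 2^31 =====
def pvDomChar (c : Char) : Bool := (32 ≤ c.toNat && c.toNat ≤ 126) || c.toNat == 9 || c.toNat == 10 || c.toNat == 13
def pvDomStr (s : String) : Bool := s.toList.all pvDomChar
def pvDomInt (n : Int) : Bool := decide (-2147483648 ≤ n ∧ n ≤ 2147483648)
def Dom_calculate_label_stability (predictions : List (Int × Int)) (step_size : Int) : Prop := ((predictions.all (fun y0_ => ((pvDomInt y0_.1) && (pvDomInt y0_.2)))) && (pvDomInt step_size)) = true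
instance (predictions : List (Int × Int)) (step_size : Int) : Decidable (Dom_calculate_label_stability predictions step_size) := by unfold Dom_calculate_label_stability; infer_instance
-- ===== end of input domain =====

-- B replaces A's streak/current-label state machine by a one-pass occurrence count
-- followed by multiplying each count by step_size (objective: simpler).

-- ===== PORT A =====
def calculate_label_stability (predictions : List (Int × Int)) (step_size : Int) : List (Int × Int) :=
    -- predictions[0]: on the empty list Python raises IndexError; Pre_ excludes it,
    -- so the default of pyGetD is never used
    let p0 := PySem.List.pyGetD predictions 0 (0, 0)
    let s := (PySem.List.pyRange 1 (predictions.length : Int) 1).foldl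
      (fun (st : PySem.Dict Int Int × Int × Int) i =>
        -- st = (stability_scores, current_label, current_streak); i is always in range
        let label := (PySem.List.pyGetD predictions i (0, 0)).2
        if label == st.2.1 then (st.1, st.2.1, st.2.2 + step_size)
        else (st.1.modify st.2.1 0 (· + st.2.2), label, step_size))
      (PySem.Dict.empty, p0.2, step_size)
    -- final update for the last streak
    (s.1.modify s.2.1 0 (· + s.2.2)).items

-- ===== PORT B =====
def calculate_label_stability_alt (predictions : List (Int × Int)) (step_size : Int) : List (Int × Int) :=
  let counts := predictions.foldl
    (fun (d : PySem.Dict Int Int) p => d.insert p.2 (d.getD p.2 0 + 1)) PySem.Dict.empty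
  counts.items.map (fun kv => (kv.1, kv.2 * step_size))

-- ===== PRECONDITION & SPEC =====
-- Pre_ excludes exactly the empty list, on which Python A raises IndexError.
def Pre_calculate_label_stability (predictions : List (Int × Int)) (step_size : Int) : Prop :=
  predictions ≠ []
instance (predictions : List (Int × Int)) (step_size : Int) : Decidable (Pre_calculate_label_stability predictions step_size) := by unfold Pre_calculate_label_stability; infer_instance
def pvWitness_calculate_label_stability : (List (Int × Int)) × Int := ([(1, 1), (2, 1), (3, 4)], 2)

def Spec_calculate_label_stability (predictions : List (Int × Int)) (step_size : Int) (out : List (Int × Int)) : Prop := out = calculate_label_stability_alt predictions step_size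
instance (predictions : List (Int × Int)) (step_size : Int) (out : List (Int × Int)) : Decidable (Spec_calculate_label_stability predictions step_size out) := by unfold Spec_calculate_label_stability; infer_instance

-- ===== CLAIM (what is proved, stated in full; the proofs are below) =====
def Claim_equal_calculate_label_stability : Prop := ∀ (predictions : List (Int × Int)) (step_size : Int), Dom_calculate_label_stability predictions step_size → Pre_calculate_label_stability predictions step_size → Spec_calculate_label_stability predictions step_size (calculate_label_stability predictions step_size)

-- ===== LEMMAS AND PROOFS =====

-- two additive updates of the same key fuse into one
theorem modify_modify_add (d : PySem.Dict Int Int) (k a b : Int) :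
    (d.modify k 0 (· + a)).modify k 0 (· + b) = d.modify k 0 (· + (a + b)) := by
  simp [PySem.Dict.modify, PySem.Dict.getD_insert_self, PySem.Dict.insert_insert_self, add_assoc]

-- a per-element additive modify loop adds step_size * count to each key
theorem getD_modify_loop (step_size : Int) (lbls : List Int) :
    ∀ (d : PySem.Dict Int Int) (v : Int),
      (lbls.foldl (fun d x => d.modify x 0 (· + step_size)) d).getD v 0
        = d.getD v 0 + step_size * lbls.count v := by
  induction lbls with
  | nil => intro d v; simp
  | cons a t ih =>
    intro d v
    simp only [List.foldl_cons, ih, List.count_cons]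
    rw [PySem.Dict.getD_modify]
    by_cases h : v = a
    · simp [h]; ring
    · simp [h, Ne.symm h]

-- A's streak machine, started in any state and closed by the trailing update,
-- is a plain per-element additive modify loop
theorem streak_loop_eq (step_size : Int) (lbls : List Int) :
    ∀ (d : PySem.Dict Int Int) (cur streak : Int),
      ((lbls.foldl
        (fun (st : PySem.Dict Int Int × Int × Int) label =>
          if label == st.2.1 then (st.1, st.2.1, st.2.2 + step_size)
          else (st.1.modify st.2.1 0 (· + st.2.2), label, step_size))
        (d, cur, streak)).1.modify
       (lbls.foldl
        (fun (st : PySem.Dict Int Int × Int × Int) label =>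
          if label == st.2.1 then (st.1, st.2.1, st.2.2 + step_size)
          else (st.1.modify st.2.1 0 (· + st.2.2), label, step_size))
        (d, cur, streak)).2.1 0
       (· + (lbls.foldl
        (fun (st : PySem.Dict Int Int × Int × Int) label =>
          if label == st.2.1 then (st.1, st.2.1, st.2.2 + step_size)
          else (st.1.modify st.2.1 0 (· + st.2.2), label, step_size))
        (d, cur, streak)).2.2))
      = lbls.foldl (fun d x => d.modify x 0 (· + step_size)) (d.modify cur 0 (· + streak)) := by
  induction lbls with
  | nil => intro d cur streak; rfl
  | cons a t ih =>
    intro d cur streak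
    simp only [List.foldl_cons]
    by_cases h : a = cur
    · subst h
      simp only [BEq.rfl, if_true]
      rw [ih]
      rw [← modify_modify_add]
    · have hb : (a == cur) = false := by simp [h]
      simp only [hb, Bool.false_eq_true, if_false]
      rw [ih]

theorem calculate_label_stability_cons (p : Int × Int) (ps : List (Int × Int)) (step_size : Int) :
    calculate_label_stability (p :: ps) step_size = calculate_label_stability_alt (p :: ps) step_size := by
  simp only [calculate_label_stability, calculate_label_stability_alt]
  rw [show PySem.List.pyGetD (p::ps) (0:Int) ((0:Int),(0:Int)) = p by
        simp [PySem.List.pyGetD, PySem.List.pyGet?, PySem.List.pyIdx?]]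
  rw [PySem.List.foldl_pyRange_pyGetD' (p::ps) ((0:Int),(0:Int))
      (fun (st : PySem.Dict Int Int × Int × Int) (pr : Int × Int) =>
        if pr.2 == st.2.1 then (st.1, st.2.1, st.2.2 + step_size)
        else (st.1.modify st.2.1 0 (· + st.2.2), pr.2, step_size)) _ (by norm_num)]
  simp only [Int.toNat_one, List.drop_succ_cons, List.drop_zero]
  rw [← List.foldl_map (f := Prod.snd)
      (g := fun (st : PySem.Dict Int Int × Int × Int) (label : Int) =>
        if label == st.2.1 then (st.1, st.2.1, st.2.2 + step_size)
        else (st.1.modify st.2.1 0 (· + st.2.2), label, step_size)) (l := ps)]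
  rw [streak_loop_eq]
  rw [show (PySem.Dict.empty : PySem.Dict Int Int).modify p.2 0 (· + step_size)
        = (fun (d : PySem.Dict Int Int) (x : Int) => d.modify x 0 (· + step_size)) PySem.Dict.empty p.2 from rfl,
      ← List.foldl_cons]
  rw [← List.foldl_map (f := Prod.snd)
      (g := fun (d : PySem.Dict Int Int) (x : Int) => d.insert x (d.getD x 0 + 1)) (l := p :: ps)]
  rw [PySem.Dict.foldl_insert_getD_add_one_eq_counter, PySem.Dict.items_counter]
  rw [← List.map_cons]
  rw [PySem.Dict.items_eq_map_keys _ (PySem.Dict.nodup_keys_foldl_modify_key _ (fun x => x) 0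
        (fun _ _ v => v + step_size) PySem.Dict.empty PySem.Dict.nodup_keys_empty) 0]
  rw [PySem.Dict.keys_foldl_modify _ _ (fun _ _ v => v + step_size), PySem.Dict.keys_empty,
      PySem.Set.update_nil_left]
  rw [List.map_map]
  apply List.map_congr_left
  intro k hk
  rw [getD_modify_loop]
  simp [PySem.Dict.getD_empty, mul_comm]

-- ===== VERDICT (by name: the statement is the Claim_ definition above) =====
theorem calculate_label_stability_spec : Claim_equal_calculate_label_stability := by
  intro predictions step_size _ hpre
  cases predictions with
  | nil => exact absurd rfl hpre
  | cons p ps => exact calculate_label_stability_cons p ps step_size
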